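-- pv_equiv track=rewrite | github.com/pypi-data/pypi-mirror-93 | packages/curvepy/curvepy-0.2.0-py3-none-any.whl/curvepy/aggregate.py | max_or_none
-- ===== SOURCE A (Python) =====
-- def max_or_none(iterable, lt):
--     max = None
--     for item in iterable:
--         if item is None:
--             continue
--         if max is None or item > max:
--             if item < lt:
--                 max = item
--     return max
-- ===== SOURCE B (Python) =====
-- def max_or_none(iterable, lt):
--     for item in sorted((x for x in iterable if x is not None), reverse=True):
--         if item < lt:
--             return item
--     return None
-- ===== Notes on version B (the rewrite author's own statement) =====
-- stated objective: alternative
-- what changed: Replaces A's single-pass running-max loop with sort-then-scan: sort the non-None values in descending order, then return the first one below lt (the maximum candidate).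
import Mathlib
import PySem

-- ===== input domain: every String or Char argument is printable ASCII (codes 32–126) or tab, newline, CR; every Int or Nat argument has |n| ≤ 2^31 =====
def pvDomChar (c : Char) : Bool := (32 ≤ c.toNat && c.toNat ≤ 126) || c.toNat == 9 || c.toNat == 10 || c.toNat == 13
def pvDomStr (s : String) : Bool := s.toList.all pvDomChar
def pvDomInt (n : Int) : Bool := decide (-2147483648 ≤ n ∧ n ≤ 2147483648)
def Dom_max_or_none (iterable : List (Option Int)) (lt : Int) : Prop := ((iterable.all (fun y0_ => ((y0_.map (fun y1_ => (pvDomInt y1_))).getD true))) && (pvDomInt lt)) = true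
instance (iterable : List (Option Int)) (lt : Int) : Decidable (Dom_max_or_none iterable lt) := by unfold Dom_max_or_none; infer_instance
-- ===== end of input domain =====

-- B replaces A's running-max loop by a different algorithm: sort the non-None values
-- descending, then scan for the first one below lt (an 'alternative' objective, not faster).

-- ===== PORT A =====
def max_or_none (iterable : List (Option Int)) (lt : Int) : Option Int :=
  iterable.foldl (fun max item =>
    match item with
    | none => max
    | some x =>
      if max.isNone || (match max with | some m => x > m | none => true) then
        if x < lt then some x else max
      else max) none

-- ===== PORT B =====
-- sorted(..., reverse=True) is PySem.List.sorted with reverse := true; the early-return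
-- scan of Source B's for-loop is List.find?.
def max_or_none_alt (iterable : List (Option Int)) (lt : Int) : Option Int :=
  (PySem.List.sorted (iterable.filterMap id) (fun x => x) true).find? (fun x => decide (x < lt))

-- ===== PRECONDITION & SPEC =====
def Spec_max_or_none (iterable : List (Option Int)) (lt : Int) (out : Option Int) : Prop := out = max_or_none_alt iterable lt
instance (iterable : List (Option Int)) (lt : Int) (out : Option Int) : Decidable (Spec_max_or_none iterable lt out) := by unfold Spec_max_or_none; infer_instance

-- ===== CLAIM (what is proved, stated in full; the proofs are below) =====
def Claim_equal_max_or_none : Prop := ∀ (iterable : List (Option Int)) (lt : Int), Dom_max_or_none iterable lt → Spec_max_or_none iterable lt (max_or_none iterable lt)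

-- ===== LEMMAS AND PROOFS =====

-- the optional-max combining step of A's loop
def omax (m : Option Int) (x : Int) : Option Int :=
  match m with
  | none => some x
  | some a => some (max a x)

theorem stepA_eq (lt : Int) (m : Option Int) (item : Option Int) :
    (match item with
      | none => m
      | some x =>
        if m.isNone || (match m with | some mv => x > mv | none => true) then
          if x < lt then some x else m
        else m) =
    (match (match item with
            | some x => if x < lt then some x else none
            | none => none) with
      | none => m
      | some x => omax m x) := by
  rcases item with _ | x
  · rfl
  · rcases m with _ | a <;> simp [omax] <;> split_ifs <;> simp_all
    omega

theorem foldA_eq_foldl_omax (lt : Int) (l : List (Option Int)) (m : Option Int) :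
    l.foldl (fun max item =>
      match item with
      | none => max
      | some x =>
        if max.isNone || (match max with | some mv => x > mv | none => true) then
          if x < lt then some x else max
        else max) m =
    (l.filterMap (fun item =>
      match item with
      | some x => if x < lt then some x else none
      | none => none)).foldl omax m := by
  induction l generalizing m with
  | nil => rfl
  | cons hd tl ih =>
    rw [List.foldl_cons, stepA_eq lt m hd, List.filterMap_cons]
    rcases hhd : (match hd with
            | some x => if x < lt then some x else none
            | none => none) with _ | x
    · rw [hhd]; exact ih m
    · rw [hhd]; exact ih (omax m x)

-- the filtered values A folds over are exactly filter (< lt) of the non-None values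
theorem filterMap_if_eq_filter (lt : Int) (l : List (Option Int)) :
    l.filterMap (fun item =>
      match item with
      | some x => if x < lt then some x else none
      | none => none) =
    (l.filterMap id).filter (fun x => decide (x < lt)) := by
  induction l with
  | nil => rfl
  | cons hd tl ih =>
    rcases hd with _ | x
    · simpa using ih
    · by_cases h : x < lt <;> simp [h, ih]

theorem foldl_omax_eq_max? (l : List Int) (m : Option Int) :
    l.foldl omax m = (match m with | none => l.max? | some a => some (l.foldl max a)) := by
  induction l generalizing m with
  | nil => rcases m with _ | a <;> rfl
  | cons hd tl ih =>
    rcases m with _ | a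
    · simp [List.foldl_cons, omax, ih, List.max?]
    · simp [List.foldl_cons, omax, ih]

theorem find?_eq_head?_filter (p : Int → Bool) (l : List Int) :
    l.find? p = (l.filter p).head? :=
  List.head?_filter.symm

theorem foldl_max_of_le (tl : List Int) (hd : Int) (hle : ∀ b ∈ tl, b ≤ hd) :
    tl.foldl max hd = hd := by
  induction tl with
  | nil => rfl
  | cons a t ih =>
    have ha : a ≤ hd := hle a (.head t)
    rw [List.foldl_cons, max_eq_left ha]
    exact ih (fun b hb => hle b (.tail a hb))

-- head of a descending-pairwise list is its max?
theorem head?_eq_max?_of_desc (l : List Int) (h : l.Pairwise (fun a b => b ≤ a)) :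
    l.head? = l.max? := by
  rcases l with _ | ⟨hd, tl⟩
  · rfl
  · have hle : ∀ b ∈ tl, b ≤ hd := (List.pairwise_cons.mp h).1
    simp only [List.head?_cons, List.max?_cons']
    rw [foldl_max_of_le tl hd hle]

theorem max?_perm (l l' : List Int) (h : l.Perm l') : l.max? = l'.max? := by
  rcases hl : l.max? with _ | a
  · rw [List.max?_eq_none_iff] at hl
    subst hl
    rw [List.nil_perm] at h
    subst h
    rfl
  · rw [List.max?_eq_some_iff] at hl
    symm
    rw [List.max?_eq_some_iff]
    exact ⟨h.mem_iff.mp hl.1, fun b hb => hl.2 b (h.mem_iff.mpr hb)⟩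

-- ===== VERDICT (by name: the statement is the Claim_ definition above) =====
theorem max_or_none_spec : Claim_equal_max_or_none := by
  intro iterable lt _
  unfold Spec_max_or_none max_or_none max_or_none_alt
  rw [foldA_eq_foldl_omax, filterMap_if_eq_filter, foldl_omax_eq_max?,
      find?_eq_head?_filter]
  have hperm : ((PySem.List.sorted (iterable.filterMap id) (fun x => x) true).filter
      (fun x => decide (x < lt))).Perm ((iterable.filterMap id).filter (fun x => decide (x < lt))) :=
    (PySem.List.sorted_perm _ _ _).filter _
  have hdesc : ((PySem.List.sorted (iterable.filterMap id) (fun x => x) true).filter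
      (fun x => decide (x < lt))).Pairwise (fun a b => b ≤ a) :=
    (PySem.List.sorted_pairwise_rev _ _).filter _
  rw [head?_eq_max?_of_desc _ hdesc, max?_perm _ _ hperm]
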